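-- pv_equiv track=rewrite | github.com/wchickering/cs399 | common/genGraphSessions2.py | limitedBFS
-- ===== SOURCE A (Python) =====
-- from collections import deque
--
-- def limitedBFS(graph, source, l):
--     assert(l > 0)
--     visited = []
--     q = deque()
--     q.appendleft((source, 0))
--     while q:
--         (n, d) = q.pop()
--         visited.append(n)
--         if d < l:
--             for neighbor in graph[n][0]:
--                 q.appendleft((neighbor, d+1))
--     return visited
-- ===== SOURCE B (Python) =====
-- def limitedBFS(graph, source, l):
--     assert(l > 0)
--     visited = []
--     frontier = [source]
--     d = 0
--     while frontier:
--         visited.extend(frontier)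
--         if d == l:
--             break
--         frontier = [m for n in frontier for m in graph[n][0]]
--         d += 1
--     return visited
-- ===== Notes on version B (the rewrite author's own statement) =====
-- stated objective: alternative
-- what changed: Replaces the per-node FIFO deque carrying (node, depth) pairs with a level-synchronous BFS: a single depth counter and whole-frontier lists, appending each level at once and building the next level by a flat comprehension; Pre_ excludes exactly the inputs where A raises (AssertionError for l <= 0, KeyError/IndexError when some node within BFS distance < l of source has no key or an empty value list).
import Mathlib
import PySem

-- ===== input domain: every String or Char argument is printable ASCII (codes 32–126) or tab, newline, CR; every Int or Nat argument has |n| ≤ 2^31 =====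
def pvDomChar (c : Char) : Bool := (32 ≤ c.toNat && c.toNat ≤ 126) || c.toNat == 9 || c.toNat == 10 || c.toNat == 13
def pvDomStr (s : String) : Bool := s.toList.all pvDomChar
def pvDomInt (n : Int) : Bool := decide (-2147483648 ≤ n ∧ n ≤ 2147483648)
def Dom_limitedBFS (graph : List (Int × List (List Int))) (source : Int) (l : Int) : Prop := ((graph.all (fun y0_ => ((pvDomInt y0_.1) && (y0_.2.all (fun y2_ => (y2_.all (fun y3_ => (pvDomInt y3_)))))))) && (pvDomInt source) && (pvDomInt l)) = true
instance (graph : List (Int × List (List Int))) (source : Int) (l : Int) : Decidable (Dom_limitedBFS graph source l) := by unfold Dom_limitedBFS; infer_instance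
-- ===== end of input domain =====

-- B replaces A's per-node FIFO deque of (node, depth) pairs with a level-synchronous BFS over whole
-- frontier lists (alternative decomposition, same cost); equivalence is proved on Pre_ below.


-- ===== PORT A =====
-- graph[n][0]: first matching key's value, then its first element; Python raises KeyError/IndexError
-- where this returns the default [] — exactly those inputs are excluded by Pre_limitedBFS.
def pvNeigh (graph : List (Int × List (List Int))) (n : Int) : List Int :=
  match graph.find? (fun p => p.1 == n) with
  | some p => match p.2 with
    | ls :: _ => ls
    | [] => []
  | none => []

-- length of an entry's first neighbor list (0 if absent); used only for A's termination measure
def pvFirstLen (p : Int × List (List Int)) : Nat :=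
  match p.2 with
  | [] => 0
  | ls :: _ => ls.length

def pvBnd (graph : List (Int × List (List Int))) : Nat :=
  graph.foldl (fun acc p => max acc (pvFirstLen p)) 0

theorem pvFoldlMax_init_le (f : (Int × List (List Int)) → Nat) :
    ∀ (l : List (Int × List (List Int))) (a : Nat), a ≤ l.foldl (fun acc p => max acc (f p)) a := by
  intro l
  induction l with
  | nil => intro a; simp
  | cons y t ih =>
    intro a
    calc a ≤ max a (f y) := le_max_left _ _
    _ ≤ _ := ih (max a (f y))

theorem pvMem_le_foldlMax (f : (Int × List (List Int)) → Nat) :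
    ∀ (l : List (Int × List (List Int))) (a : Nat) (x), x ∈ l → f x ≤ l.foldl (fun acc p => max acc (f p)) a := by
  intro l
  induction l with
  | nil => intro a x hx; cases hx
  | cons y t ih =>
    intro a x hx
    rcases List.mem_cons.mp hx with h | h
    · subst h
      calc f x ≤ max a (f x) := le_max_right _ _
      _ ≤ _ := pvFoldlMax_init_le f t _
    · exact ih _ x h

theorem pvNeigh_len_le (graph : List (Int × List (List Int))) (n : Int) :
    (pvNeigh graph n).length ≤ pvBnd graph := by
  unfold pvNeigh
  cases hf : graph.find? (fun p => p.1 == n) with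
  | none => simp
  | some p =>
    have hmem : p ∈ graph := List.mem_of_find?_eq_some hf
    have h := pvMem_le_foldlMax pvFirstLen graph 0 p hmem
    rcases p with ⟨a, b⟩
    cases b with
    | nil => simp
    | cons ls rest =>
      simp only [pvFirstLen] at h
      simpa [pvBnd] using h

theorem pvSum_map_map (c : Nat) (g : Int → Int × Int) (w : Int × Int → Nat) (hw : ∀ m, w (g m) = c) :
    ∀ (l : List Int), (List.map w (List.map g l)).sum = l.length * c := by
  intro l
  induction l with
  | nil => simp
  | cons x t ih =>
    simp only [List.map_cons, List.sum_cons, ih, hw, List.length_cons]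
    ring

-- A's while loop, transliterated: the deque is the list q with its pop end at the head and
-- appendleft appending at the tail.
def pvLoopA (graph : List (Int × List (List Int))) (l : Int) (visited : List Int) (q : List (Int × Int)) : List Int :=
  match q with
  | [] => visited
  | (n, d) :: rest =>
    if d < l then
      pvLoopA graph l (visited ++ [n]) (rest ++ (pvNeigh graph n).map (fun m => (m, d + 1)))
    else
      pvLoopA graph l (visited ++ [n]) rest
termination_by (q.map (fun pr => (pvBnd graph + 1) ^ ((l + 1 - pr.2).toNat))).sum
decreasing_by
  · simp only [List.map_append, List.sum_append, List.map_cons, List.sum_cons]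
    have he : (l + 1 - (d + 1)).toNat + 1 = (l + 1 - d).toNat := by omega
    have hk : (pvNeigh graph n).length ≤ pvBnd graph := pvNeigh_len_le graph n
    have hconst := pvSum_map_map ((pvBnd graph + 1) ^ ((l + 1 - (d + 1)).toNat))
      (fun m => (m, d + 1)) (fun pr => (pvBnd graph + 1) ^ ((l + 1 - pr.2).toNat))
      (fun m => rfl) (pvNeigh graph n)
    rw [hconst]
    have hpos : 0 < (pvBnd graph + 1) ^ ((l + 1 - (d + 1)).toNat) := pow_pos (Nat.succ_pos _) _
    have hlt : (pvNeigh graph n).length * (pvBnd graph + 1) ^ ((l + 1 - (d + 1)).toNat)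
        < (pvBnd graph + 1) ^ ((l + 1 - d).toNat) := by
      rw [← he, pow_succ, Nat.mul_comm ((pvBnd graph + 1) ^ (l + 1 - (d + 1)).toNat) (pvBnd graph + 1)]
      exact (Nat.mul_lt_mul_right hpos).mpr (Nat.lt_succ_of_le hk)
    omega
  · simp only [List.map_cons, List.sum_cons]
    have : 0 < (pvBnd graph + 1) ^ ((l + 1 - d).toNat) := pow_pos (Nat.succ_pos _) _
    omega

-- port of A: assert(l > 0) raises for l ≤ 0 (excluded by Pre_), then the FIFO loop from [(source, 0)]
def limitedBFS (graph : List (Int × List (List Int))) (source : Int) (l : Int) : List Int :=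
  if 0 < l then pvLoopA graph l [] [(source, 0)] else []

-- ===== PORT B =====
-- B's while loop over whole levels: k counts the remaining iterations of d = 0 .. l
def pvLoopB (graph : List (Int × List (List Int))) (l : Int) : Nat → Int → List Int → List Int → List Int
  | 0, _, visited, _ => visited
  | k + 1, d, visited, frontier =>
    if frontier.isEmpty then visited
    else
      let visited := visited ++ frontier
      if d < l then pvLoopB graph l k (d + 1) visited (frontier.flatMap (pvNeigh graph))
      else pvLoopB graph l k (d + 1) visited frontier

def limitedBFS_alt (graph : List (Int × List (List Int))) (source : Int) (l : Int) : List Int :=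
  if 0 < l then pvLoopB graph l (l + 1).toNat 0 [] [source] else []

-- ===== PRECONDITION & SPEC =====
-- n has a key whose value list is nonempty (graph[n][0] succeeds in Python)
def pvGood (graph : List (Int × List (List Int))) (n : Int) : Bool :=
  match graph.find? (fun p => p.1 == n) with
  | some p => !p.2.isEmpty
  | none => false

-- one step of the deduplicated reachability closure: add all first-list neighbors of R
def pvStep (graph : List (Int × List (List Int))) (R : List Int) : List Int :=
  R.foldl (fun acc n => (pvNeigh graph n).foldl (fun acc m => if acc.contains m then acc else acc ++ [m]) acc) R

-- at most k closure steps, stopping once saturated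
def pvReach (graph : List (Int × List (List Int))) : Nat → List Int → List Int
  | 0, R => R
  | k + 1, R =>
    let R' := pvStep graph R
    if R'.length == R.length then R else pvReach graph k R'

-- distinct nodes the closure can ever add is bounded by the mentioned-node count
def pvNodeBound (graph : List (Int × List (List Int))) : Nat :=
  graph.length + (graph.flatMap (fun p => p.2.headI)).length

-- Pre_ excludes l ≤ 0 (A's assert raises) and inputs where some node at BFS distance < l from
-- source lacks a key or has an empty value list (there Python A raises KeyError/IndexError):
-- stated as a deduplicated reachability closure over the input graph, exact for A's domain.
def Pre_limitedBFS (graph : List (Int × List (List Int))) (source : Int) (l : Int) : Prop :=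
  0 < l ∧ (pvReach graph (min (l - 1).toNat (pvNodeBound graph)) [source]).all (pvGood graph) = true
instance (graph : List (Int × List (List Int))) (source : Int) (l : Int) : Decidable (Pre_limitedBFS graph source l) := by unfold Pre_limitedBFS; infer_instance

def pvWitness_limitedBFS : (List (Int × List (List Int))) × Int × Int := ([(0, [[1]]), (1, [[]])], 0, 1)

def Spec_limitedBFS (graph : List (Int × List (List Int))) (source : Int) (l : Int) (out : List Int) : Prop := out = limitedBFS_alt graph source l
instance (graph : List (Int × List (List Int))) (source : Int) (l : Int) (out : List Int) : Decidable (Spec_limitedBFS graph source l out) := by unfold Spec_limitedBFS; infer_instance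

-- ===== CLAIM (what is proved, stated in full; the proofs are below) =====
def Claim_equal_limitedBFS : Prop := ∀ (graph : List (Int × List (List Int))) (source : Int) (l : Int), Dom_limitedBFS graph source l → Pre_limitedBFS graph source l → Spec_limitedBFS graph source l (limitedBFS graph source l)

-- ===== LEMMAS AND PROOFS =====

-- the common level structure: pvExpand k f = f ++ next level ++ … for k further expansion rounds
def pvExpand (graph : List (Int × List (List Int))) : Nat → List Int → List Int
  | 0, f => f
  | k + 1, f => f ++ pvExpand graph k (f.flatMap (pvNeigh graph))

theorem pvExpand_nil (graph : List (Int × List (List Int))) : ∀ k, pvExpand graph k [] = [] := by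
  intro k
  induction k with
  | zero => rfl
  | succ k ih => simp [pvExpand, ih]

theorem pvLoopA_flat (graph : List (Int × List (List Int))) (l d : Int) (h : ¬ d < l) :
    ∀ (xs vis : List Int), pvLoopA graph l vis (xs.map (fun n => (n, d))) = vis ++ xs := by
  intro xs
  induction xs with
  | nil => intro vis; simp [pvLoopA]
  | cons x t ih =>
    intro vis
    rw [List.map_cons, pvLoopA, if_neg h, ih]
    simp

theorem pvLoopA_level (graph : List (Int × List (List Int))) (l d : Int) (h : d < l) :
    ∀ (xs ys vis : List Int),
      pvLoopA graph l vis (xs.map (fun n => (n, d)) ++ ys.map (fun n => (n, d + 1)))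
        = pvLoopA graph l (vis ++ xs) ((ys ++ xs.flatMap (pvNeigh graph)).map (fun n => (n, d + 1))) := by
  intro xs
  induction xs with
  | nil => intro ys vis; simp
  | cons x t ih =>
    intro ys vis
    rw [List.map_cons, List.cons_append, pvLoopA, if_pos h]
    have : (t.map (fun n => (n, d)) ++ ys.map (fun n => (n, d + 1))) ++ (pvNeigh graph x).map (fun m => (m, d + 1))
        = t.map (fun n => (n, d)) ++ (ys ++ pvNeigh graph x).map (fun n => (n, d + 1)) := by
      simp [List.append_assoc]
    rw [this, ih]
    simp [List.flatMap_cons, List.append_assoc]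

theorem pvLoopA_expand (graph : List (Int × List (List Int))) (l : Int) :
    ∀ (k : Nat) (d : Int), d ≤ l → (l - d).toNat = k →
      ∀ (f vis : List Int), pvLoopA graph l vis (f.map (fun n => (n, d))) = vis ++ pvExpand graph k f := by
  intro k
  induction k with
  | zero =>
    intro d hdl hk f vis
    have hd : ¬ d < l := by omega
    rw [pvLoopA_flat graph l d hd]
    rfl
  | succ k ih =>
    intro d hdl hk f vis
    have hd : d < l := by omega
    have := pvLoopA_level graph l d hd f [] vis
    simp only [List.map_nil, List.nil_append, List.append_nil] at this
    rw [this, ih (d + 1) (by omega) (by omega)]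
    simp [pvExpand, List.append_assoc]

theorem pvLoopB_expand (graph : List (Int × List (List Int))) (l : Int) :
    ∀ (k : Nat) (d : Int), d ≤ l → (l - d).toNat = k →
      ∀ (f vis : List Int), pvLoopB graph l (k + 1) d vis f = vis ++ pvExpand graph k f := by
  intro k
  induction k with
  | zero =>
    intro d hdl hk f vis
    have hd : ¬ d < l := by omega
    cases f with
    | nil => simp [pvLoopB, pvExpand]
    | cons x t =>
      rw [pvLoopB]
      simp only [List.isEmpty_cons, Bool.false_eq_true, if_false, if_neg hd]
      simp [pvLoopB, pvExpand]
  | succ k ih =>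
    intro d hdl hk f vis
    have hd : d < l := by omega
    cases f with
    | nil => simp [pvLoopB, pvExpand_nil]
    | cons x t =>
      rw [pvLoopB]
      simp only [List.isEmpty_cons, Bool.false_eq_true, if_false, if_pos hd]
      rw [ih (d + 1) (by omega) (by omega)]
      simp [pvExpand, List.append_assoc]

-- ===== VERDICT (by name: the statement is the Claim_ definition above) =====
theorem limitedBFS_spec : Claim_equal_limitedBFS := by
  intro graph source l _ hpre
  obtain ⟨hl, -⟩ := hpre
  unfold Spec_limitedBFS limitedBFS limitedBFS_alt
  rw [if_pos hl, if_pos hl]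
  have hA : pvLoopA graph l [] ([source].map (fun n => (n, (0 : Int)))) = [] ++ pvExpand graph l.toNat [source] :=
    pvLoopA_expand graph l l.toNat 0 (by omega) (by omega) [source] []
  simp only [List.map_cons, List.map_nil, List.nil_append] at hA
  rw [hA]
  have hk : (l + 1).toNat = l.toNat + 1 := by omega
  rw [hk, pvLoopB_expand graph l l.toNat 0 (by omega) (by omega) [source] []]
  simp
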